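-- pv_equiv track=rewrite | github.com/lstorchi/CurveFittingML | generalutil.py | build_vsettorm
-- ===== SOURCE A (Python) =====
-- def build_vsettorm (vlist):
--
--     vset_torm = []
--
--     vtoremove = []
--     for i in range(1,len(vlist),2):
--         vtoremove.append(vlist[i])
--     vset_torm.append(vtoremove)
--
--     vtoremove = []
--     for i in range(0,len(vlist),2):
--         vtoremove.append(vlist[i])
--     vset_torm.append(vtoremove)
--
--     vtoremove = []
--     for i in range(1,len(vlist),3):
--         vtoremove.append(vlist[i])
--         if (i+1 < len(vlist)):
--             vtoremove.append(vlist[i+1])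
--     vset_torm.append(vtoremove)
--
--     vtoremove = []
--     for i in range(0,len(vlist),3):
--         vtoremove.append(vlist[i])
--         if (i+1 < len(vlist)):
--             vtoremove.append(vlist[i+1])
--     vset_torm.append(vtoremove)
--
--     vtoremove = []
--     for i in range(1,len(vlist),4):
--         vtoremove.append(vlist[i])
--         if (i+1 < len(vlist)):
--             vtoremove.append(vlist[i+1])
--         if (i+2 < len(vlist)):
--             vtoremove.append(vlist[i+2])
--     vset_torm.append(vtoremove)
--
--     vtoremove = []
--     for i in range(0,len(vlist),4):
--         vtoremove.append(vlist[i])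
--         if (i+1 < len(vlist)):
--             vtoremove.append(vlist[i+1])
--         if (i+2 < len(vlist)):
--             vtoremove.append(vlist[i+2])
--     vset_torm.append(vtoremove)
--
--     return vset_torm
-- ===== SOURCE B (Python) =====
-- def build_vsettorm(vlist):
--     ev = list(enumerate(vlist))
--     return [
--         [v for i, v in ev if i % 2 == 1],
--         [v for i, v in ev if i % 2 == 0],
--         [v for i, v in ev if i % 3 != 0],
--         [v for i, v in ev if i % 3 != 2],
--         [v for i, v in ev if i % 4 != 0],
--         [v for i, v in ev if i % 4 != 3],
--     ]
-- ===== Notes on version B (the rewrite author's own statement) =====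
-- stated objective: simpler
-- what changed: Replaces A's six strided outer loops with boundary-guarded neighbour appends by six residue-filter comprehensions over a single enumeration of the list (index mod 2/3/4 predicates).
import Mathlib
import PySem

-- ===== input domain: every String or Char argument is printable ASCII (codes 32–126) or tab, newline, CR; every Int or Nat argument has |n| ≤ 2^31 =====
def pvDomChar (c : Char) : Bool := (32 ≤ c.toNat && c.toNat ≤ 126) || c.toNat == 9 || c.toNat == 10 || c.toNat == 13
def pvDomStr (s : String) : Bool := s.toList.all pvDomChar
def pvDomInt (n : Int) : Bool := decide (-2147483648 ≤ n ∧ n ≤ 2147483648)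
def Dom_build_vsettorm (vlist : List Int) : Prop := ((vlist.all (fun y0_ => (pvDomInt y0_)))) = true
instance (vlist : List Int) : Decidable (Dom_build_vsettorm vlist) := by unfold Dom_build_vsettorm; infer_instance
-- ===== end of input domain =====

-- B replaces A's six strided loops (with neighbour appends guarded by bounds checks) by six
-- residue-filter passes over one enumeration of the list; same cost, simpler decomposition.

-- ===== PORT A =====
def build_vsettorm (vlist : List Int) : List (List Int) :=
  let n : Int := PySem.List.len vlist
  let l1 := (PySem.List.pyRange 1 n 2).foldl
      (fun acc i => acc ++ [PySem.List.pyGetD vlist i 0]) []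
  let l2 := (PySem.List.pyRange 0 n 2).foldl
      (fun acc i => acc ++ [PySem.List.pyGetD vlist i 0]) []
  let l3 := (PySem.List.pyRange 1 n 3).foldl
      (fun acc i =>
        let acc := acc ++ [PySem.List.pyGetD vlist i 0]
        if i + 1 < n then acc ++ [PySem.List.pyGetD vlist (i+1) 0] else acc) []
  let l4 := (PySem.List.pyRange 0 n 3).foldl
      (fun acc i =>
        let acc := acc ++ [PySem.List.pyGetD vlist i 0]
        if i + 1 < n then acc ++ [PySem.List.pyGetD vlist (i+1) 0] else acc) []
  let l5 := (PySem.List.pyRange 1 n 4).foldl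
      (fun acc i =>
        let acc := acc ++ [PySem.List.pyGetD vlist i 0]
        let acc := if i + 1 < n then acc ++ [PySem.List.pyGetD vlist (i+1) 0] else acc
        if i + 2 < n then acc ++ [PySem.List.pyGetD vlist (i+2) 0] else acc) []
  let l6 := (PySem.List.pyRange 0 n 4).foldl
      (fun acc i =>
        let acc := acc ++ [PySem.List.pyGetD vlist i 0]
        let acc := if i + 1 < n then acc ++ [PySem.List.pyGetD vlist (i+1) 0] else acc
        if i + 2 < n then acc ++ [PySem.List.pyGetD vlist (i+2) 0] else acc) []
  [l1, l2, l3, l4, l5, l6]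

-- ===== PORT B =====
def build_vsettorm_alt (vlist : List Int) : List (List Int) :=
  let ev := PySem.List.enumerate vlist
  [ (ev.filter (fun p => PySem.Int.mod p.1 2 == 1)).map Prod.snd,
    (ev.filter (fun p => PySem.Int.mod p.1 2 == 0)).map Prod.snd,
    (ev.filter (fun p => PySem.Int.mod p.1 3 != 0)).map Prod.snd,
    (ev.filter (fun p => PySem.Int.mod p.1 3 != 2)).map Prod.snd,
    (ev.filter (fun p => PySem.Int.mod p.1 4 != 0)).map Prod.snd,
    (ev.filter (fun p => PySem.Int.mod p.1 4 != 3)).map Prod.snd ]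

-- ===== PRECONDITION & SPEC =====
def Spec_build_vsettorm (vlist : List Int) (out : List (List Int)) : Prop := out = build_vsettorm_alt vlist
instance (vlist : List Int) (out : List (List Int)) : Decidable (Spec_build_vsettorm vlist out) := by unfold Spec_build_vsettorm; infer_instance

-- ===== CLAIM (what is proved, stated in full; the proofs are below) =====
def Claim_equal_build_vsettorm : Prop := ∀ (vlist : List Int), Dom_build_vsettorm vlist → Spec_build_vsettorm vlist (build_vsettorm vlist)

-- ===== LEMMAS AND PROOFS =====

theorem pyRange_nil_of_le {s : Int} (hs : 0 < s) {a n : Int} (h : n ≤ a) :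
    PySem.List.pyRange a n s = [] := by
  rw [PySem.List.pyRange_of_pos _ _ hs]
  simp [not_lt.mpr h]

theorem pyRange_cons_of_pos {s : Int} (hs : 0 < s) {a n : Int} (h : a < n) :
    PySem.List.pyRange a n s = a :: PySem.List.pyRange (a + s) n s := by
  rw [PySem.List.pyRange_of_pos _ _ hs, PySem.List.pyRange_of_pos _ _ hs]
  have h2 : (n - a + s - 1) / s = (n - a - 1) / s + 1 := by
    rw [show n - a + s - 1 = (n - a - 1) + 1 * s by ring,
        Int.add_mul_ediv_right _ _ (by omega : s ≠ 0)]
  have h3 : 0 ≤ (n - a - 1) / s := Int.ediv_nonneg (by omega) (by omega)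
  by_cases h4 : a + s < n
  · rw [if_pos h, if_pos h4, show n - (a + s) + s - 1 = n - a - 1 by ring, h2,
        show ((n - a - 1) / s + 1).toNat = ((n - a - 1) / s).toNat + 1 by omega,
        List.range_succ_eq_map, List.map_cons, List.map_map]
    congr 1
    · push_cast; ring
    · apply List.map_congr_left
      intro k _
      simp only [Function.comp_apply]
      push_cast
      ring
  · have h5 : (n - a - 1) / s = 0 := Int.ediv_eq_zero_of_lt (by omega) (by omega)
    rw [if_pos h, if_neg h4, h2, h5]
    simp

theorem flatMap_congr_mem {α β : Type} (l : List α) {f g : α → List β}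
    (h : ∀ x ∈ l, f x = g x) : l.flatMap f = l.flatMap g := by
  induction l with
  | nil => rfl
  | cons x xs ih =>
      simp only [List.flatMap_cons]
      rw [h x (by simp), ih (fun y hy => h y (by simp [hy]))]

-- the core identity: blocks of width s-1 starting at the multiples-of-s offsets from a
-- cover exactly the indices j in [a, n) with (j - a) % s ≠ s - 1
theorem stride_filter (s : Int) (hs : 2 ≤ s) :
    ∀ (k : Nat) (a n : Int), n - a ≤ k →
      (PySem.List.pyRange a n s).flatMap (fun i => PySem.List.pyRange i (min (i + s - 1) n))
        = (PySem.List.pyRange a n).filter (fun j => decide ((j - a) % s ≠ s - 1)) := by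
  intro k
  induction k with
  | zero =>
      intro a n h
      rw [pyRange_nil_of_le (by omega) (by omega), PySem.List.pyRange_one_eq_nil (by omega)]
      rfl
  | succ k ih =>
      intro a n h
      by_cases han : a < n
      · rw [pyRange_cons_of_pos (by omega) han, List.flatMap_cons,
            PySem.List.pyRange_one_append a (min (a + s) n) n (by omega) (by omega),
            List.filter_append]
        congr 1
        · by_cases h2 : a + s ≤ n
          · have hmin : min (a + s) n = a + s := by omega
            have hmin2 : min (a + s - 1) n = a + s - 1 := by omega
            rw [hmin, hmin2,
                PySem.List.pyRange_one_append a (a + s - 1) (a + s) (by omega) (by omega),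
                List.filter_append,
                show PySem.List.pyRange (a + s - 1) (a + s) = [a + s - 1] from by
                  rw [show a + s = (a + s - 1) + 1 by ring]
                  simpa using PySem.List.pyRange_one_singleton (a + s - 1)]
            have hfall : (PySem.List.pyRange a (a + s - 1)).filter
                (fun j => decide ((j - a) % s ≠ s - 1)) = PySem.List.pyRange a (a + s - 1) := by
              apply List.filter_eq_self.mpr
              intro j hj
              have hm := PySem.List.mem_pyRange_one.1 hj
              have hmod : (j - a) % s = j - a := Int.emod_eq_of_lt (by omega) (by omega)
              simp only [hmod, decide_eq_true_eq]
              omega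
            have hlast : ((a + s - 1) - a) % s = s - 1 := by
              rw [show (a + s - 1) - a = s - 1 by ring]
              exact Int.emod_eq_of_lt (by omega) (by omega)
            rw [hfall]
            simp [hlast]
          · have hmin : min (a + s) n = n := by omega
            have hmin2 : min (a + s - 1) n = n := by omega
            rw [hmin, hmin2]
            symm
            apply List.filter_eq_self.mpr
            intro j hj
            have hm := PySem.List.mem_pyRange_one.1 hj
            have hmod : (j - a) % s = j - a := Int.emod_eq_of_lt (by omega) (by omega)
            simp only [hmod, decide_eq_true_eq]
            omega
        · by_cases h2 : a + s ≤ n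
          · have hmin : min (a + s) n = a + s := by omega
            rw [hmin, ih (a + s) n (by omega)]
            apply List.filter_congr
            intro j hj
            simp only [decide_eq_decide]
            rw [show j - a = (j - (a + s)) + s * 1 by ring, Int.add_mul_emod_self_left]
          · have hmin : min (a + s) n = n := by omega
            rw [hmin, pyRange_nil_of_le (by omega) (by omega),
                PySem.List.pyRange_one_eq_nil (by omega)]
            rfl
      · rw [pyRange_nil_of_le (by omega) (by omega), PySem.List.pyRange_one_eq_nil (by omega)]
        rfl


theorem bool_eq_of_iff {a b : Bool} (h : a = true ↔ b = true) : a = b := by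
  cases a <;> cases b <;> simp_all

-- A-side loops rewritten as filtered index passes (via flat blocks + stride_filter)
theorem loop2_eq (a n : Int) (v : Int → Int) :
    (PySem.List.pyRange a n 2).foldl (fun acc i => acc ++ [v i]) []
      = ((PySem.List.pyRange a n).filter (fun j => decide ((j - a) % 2 ≠ 2 - 1))).map v := by
  have h1 : (PySem.List.pyRange a n 2).foldl (fun acc i => acc ++ [v i]) []
      = (PySem.List.pyRange a n 2).flatMap (fun i => [v i]) := by
    simpa using PySem.List.foldl_append_eq_flatMap (fun i => [v i]) (PySem.List.pyRange a n 2) []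
  have h2 : ∀ i ∈ PySem.List.pyRange a n 2,
      [v i] = (PySem.List.pyRange i (min (i + 2 - 1) n)).map v := by
    intro i hi
    have hm := (PySem.List.mem_pyRange_iff_of_pos (by omega) i).1 hi
    have hmin : min (i + 2 - 1) n = i + 1 := by omega
    rw [hmin]
    simp [PySem.List.pyRange_one_singleton i]
  rw [h1, flatMap_congr_mem _ h2, ← List.map_flatMap,
      stride_filter 2 (by omega) (n - a).toNat a n (by omega)]

theorem loop3_eq (a n : Int) (v : Int → Int) :
    (PySem.List.pyRange a n 3).foldl
      (fun acc i =>
        let acc := acc ++ [v i]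
        if i + 1 < n then acc ++ [v (i + 1)] else acc) []
      = ((PySem.List.pyRange a n).filter (fun j => decide ((j - a) % 3 ≠ 3 - 1))).map v := by
  have hb : (fun (acc : List Int) i =>
        let acc := acc ++ [v i]
        if i + 1 < n then acc ++ [v (i + 1)] else acc)
      = fun acc i => acc ++ ([v i] ++ (if i + 1 < n then [v (i + 1)] else [])) := by
    funext acc i
    by_cases h : i + 1 < n <;> simp [h]
  have h1 : (PySem.List.pyRange a n 3).foldl
        (fun acc i =>
          let acc := acc ++ [v i]
          if i + 1 < n then acc ++ [v (i + 1)] else acc) []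
      = (PySem.List.pyRange a n 3).flatMap
          (fun i => [v i] ++ (if i + 1 < n then [v (i + 1)] else [])) := by
    rw [hb]
    simpa using PySem.List.foldl_append_eq_flatMap
      (fun i => [v i] ++ (if i + 1 < n then [v (i + 1)] else [])) (PySem.List.pyRange a n 3) []
  have h2 : ∀ i ∈ PySem.List.pyRange a n 3,
      [v i] ++ (if i + 1 < n then [v (i + 1)] else [])
        = (PySem.List.pyRange i (min (i + 3 - 1) n)).map v := by
    intro i hi
    have hm := (PySem.List.mem_pyRange_iff_of_pos (by omega) i).1 hi
    by_cases h : i + 1 < n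
    · have hmin : min (i + 3 - 1) n = i + 2 := by omega
      rw [hmin, PySem.List.pyRange_one_cons (by omega : i < i + 2),
          show PySem.List.pyRange (i + 1) (i + 2) = [i + 1] from by
            rw [show i + 2 = (i + 1) + 1 by ring]
            exact PySem.List.pyRange_one_singleton (i + 1)]
      simp [h]
    · have hmin : min (i + 3 - 1) n = i + 1 := by omega
      rw [hmin]
      simp [h, PySem.List.pyRange_one_singleton i]
  rw [h1, flatMap_congr_mem _ h2, ← List.map_flatMap,
      stride_filter 3 (by omega) (n - a).toNat a n (by omega)]

theorem loop4_eq (a n : Int) (v : Int → Int) :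
    (PySem.List.pyRange a n 4).foldl
      (fun acc i =>
        let acc := acc ++ [v i]
        let acc := if i + 1 < n then acc ++ [v (i + 1)] else acc
        if i + 2 < n then acc ++ [v (i + 2)] else acc) []
      = ((PySem.List.pyRange a n).filter (fun j => decide ((j - a) % 4 ≠ 4 - 1))).map v := by
  have hb : (fun (acc : List Int) i =>
        let acc := acc ++ [v i]
        let acc := if i + 1 < n then acc ++ [v (i + 1)] else acc
        if i + 2 < n then acc ++ [v (i + 2)] else acc)
      = fun acc i => acc ++ ([v i] ++ (if i + 1 < n then [v (i + 1)] else [])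
          ++ (if i + 2 < n then [v (i + 2)] else [])) := by
    funext acc i
    by_cases h : i + 1 < n <;> by_cases h' : i + 2 < n <;> simp [h, h']
  have h1 : (PySem.List.pyRange a n 4).foldl
        (fun acc i =>
          let acc := acc ++ [v i]
          let acc := if i + 1 < n then acc ++ [v (i + 1)] else acc
          if i + 2 < n then acc ++ [v (i + 2)] else acc) []
      = (PySem.List.pyRange a n 4).flatMap
          (fun i => [v i] ++ (if i + 1 < n then [v (i + 1)] else [])
            ++ (if i + 2 < n then [v (i + 2)] else [])) := by
    rw [hb]
    simpa using PySem.List.foldl_append_eq_flatMap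
      (fun i => [v i] ++ (if i + 1 < n then [v (i + 1)] else [])
        ++ (if i + 2 < n then [v (i + 2)] else [])) (PySem.List.pyRange a n 4) []
  have h2 : ∀ i ∈ PySem.List.pyRange a n 4,
      [v i] ++ (if i + 1 < n then [v (i + 1)] else []) ++ (if i + 2 < n then [v (i + 2)] else [])
        = (PySem.List.pyRange i (min (i + 4 - 1) n)).map v := by
    intro i hi
    have hm := (PySem.List.mem_pyRange_iff_of_pos (by omega) i).1 hi
    by_cases h' : i + 2 < n
    · have h : i + 1 < n := by omega
      have hmin : min (i + 4 - 1) n = i + 3 := by omega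
      rw [hmin, PySem.List.pyRange_one_cons (by omega : i < i + 3),
          show i + 1 = i + 1 from rfl,
          PySem.List.pyRange_one_cons (by omega : i + 1 < i + 3),
          show PySem.List.pyRange (i + 1 + 1) (i + 3) = [i + 2] from by
            rw [show i + 1 + 1 = i + 2 by ring, show i + 3 = (i + 2) + 1 by ring]
            exact PySem.List.pyRange_one_singleton (i + 2)]
      simp [h, h']
    · by_cases h : i + 1 < n
      · have hmin : min (i + 4 - 1) n = i + 2 := by omega
        rw [hmin, PySem.List.pyRange_one_cons (by omega : i < i + 2),
            show PySem.List.pyRange (i + 1) (i + 2) = [i + 1] from by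
              rw [show i + 2 = (i + 1) + 1 by ring]
              exact PySem.List.pyRange_one_singleton (i + 1)]
        simp [h, h']
      · have hmin : min (i + 4 - 1) n = i + 1 := by omega
        rw [hmin]
        simp [h, h', PySem.List.pyRange_one_singleton i]
  rw [h1, flatMap_congr_mem _ h2, ← List.map_flatMap,
      stride_filter 4 (by omega) (n - a).toNat a n (by omega)]

-- B-side: a filtered enumeration is a filtered index pass
theorem alt_eq (vlist : List Int) (p : Int × Int → Bool) :
    ((PySem.List.enumerate vlist).filter p).map Prod.snd
      = ((PySem.List.pyRange 0 (PySem.List.len vlist)).filter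
            (fun j => p (j, PySem.List.pyGetD vlist j 0))).map
          (fun j => PySem.List.pyGetD vlist j 0) := by
  rw [PySem.List.enumerate_eq_map_pyRange vlist 0, List.filter_map, List.map_map]
  rfl

-- shifting the start of the filtered pass from 1 to 0
theorem filter_shift (n : Int) (p q : Int → Bool) (h0 : q 0 = false)
    (h : ∀ j : Int, 1 ≤ j → p j = q j) :
    (PySem.List.pyRange 1 n).filter p = (PySem.List.pyRange 0 n).filter q := by
  by_cases hn : (0 : Int) < n
  · rw [PySem.List.pyRange_one_cons hn, show (0 : Int) + 1 = 1 by ring]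
    have hq : List.filter q (0 :: PySem.List.pyRange 1 n) = List.filter q (PySem.List.pyRange 1 n) := by
      simp [h0]
    rw [hq]
    apply List.filter_congr
    intro j hj
    exact h j (by have := PySem.List.mem_pyRange_one.1 hj; omega)
  · rw [PySem.List.pyRange_one_eq_nil (by omega), PySem.List.pyRange_one_eq_nil (by omega)]
    rfl

-- ===== VERDICT (by name: the statement is the Claim_ definition above) =====
theorem build_vsettorm_spec : Claim_equal_build_vsettorm := by
  intro vlist _
  unfold Spec_build_vsettorm build_vsettorm build_vsettorm_alt
  simp only []
  rw [loop2_eq 1, loop2_eq 0, loop3_eq 1, loop3_eq 0, loop4_eq 1, loop4_eq 0,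
      alt_eq vlist (fun p => PySem.Int.mod p.1 2 == 1),
      alt_eq vlist (fun p => PySem.Int.mod p.1 2 == 0),
      alt_eq vlist (fun p => PySem.Int.mod p.1 3 != 0),
      alt_eq vlist (fun p => PySem.Int.mod p.1 3 != 2),
      alt_eq vlist (fun p => PySem.Int.mod p.1 4 != 0),
      alt_eq vlist (fun p => PySem.Int.mod p.1 4 != 3)]
  dsimp only
  have q1 : (PySem.List.pyRange 1 (PySem.List.len vlist)).filter
        (fun j => decide ((j - 1) % 2 ≠ 2 - 1))
      = (PySem.List.pyRange 0 (PySem.List.len vlist)).filter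
        (fun j => PySem.Int.mod j 2 == 1) :=
    filter_shift _ _ _ (by decide) (fun j hj => by
      apply bool_eq_of_iff
      rw [PySem.Int.mod_eq_emod_of_pos (by norm_num : (0:Int) < 2)]
      simp only [decide_eq_true_eq, beq_iff_eq]
      omega)
  have q2 : (PySem.List.pyRange 0 (PySem.List.len vlist)).filter
        (fun j => decide ((j - 0) % 2 ≠ 2 - 1))
      = (PySem.List.pyRange 0 (PySem.List.len vlist)).filter
        (fun j => PySem.Int.mod j 2 == 0) :=
    List.filter_congr (fun j hj => by
      apply bool_eq_of_iff
      rw [PySem.Int.mod_eq_emod_of_pos (by norm_num : (0:Int) < 2)]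
      simp only [decide_eq_true_eq, beq_iff_eq]
      omega)
  have q3 : (PySem.List.pyRange 1 (PySem.List.len vlist)).filter
        (fun j => decide ((j - 1) % 3 ≠ 3 - 1))
      = (PySem.List.pyRange 0 (PySem.List.len vlist)).filter
        (fun j => PySem.Int.mod j 3 != 0) :=
    filter_shift _ _ _ (by decide) (fun j hj => by
      apply bool_eq_of_iff
      rw [PySem.Int.mod_eq_emod_of_pos (by norm_num : (0:Int) < 3)]
      simp only [decide_eq_true_eq, bne_iff_ne, ne_eq]
      omega)
  have q4 : (PySem.List.pyRange 0 (PySem.List.len vlist)).filter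
        (fun j => decide ((j - 0) % 3 ≠ 3 - 1))
      = (PySem.List.pyRange 0 (PySem.List.len vlist)).filter
        (fun j => PySem.Int.mod j 3 != 2) :=
    List.filter_congr (fun j hj => by
      apply bool_eq_of_iff
      rw [PySem.Int.mod_eq_emod_of_pos (by norm_num : (0:Int) < 3)]
      simp only [decide_eq_true_eq, bne_iff_ne, ne_eq]
      omega)
  have q5 : (PySem.List.pyRange 1 (PySem.List.len vlist)).filter
        (fun j => decide ((j - 1) % 4 ≠ 4 - 1))
      = (PySem.List.pyRange 0 (PySem.List.len vlist)).filter
        (fun j => PySem.Int.mod j 4 != 0) :=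
    filter_shift _ _ _ (by decide) (fun j hj => by
      apply bool_eq_of_iff
      rw [PySem.Int.mod_eq_emod_of_pos (by norm_num : (0:Int) < 4)]
      simp only [decide_eq_true_eq, bne_iff_ne, ne_eq]
      omega)
  have q6 : (PySem.List.pyRange 0 (PySem.List.len vlist)).filter
        (fun j => decide ((j - 0) % 4 ≠ 4 - 1))
      = (PySem.List.pyRange 0 (PySem.List.len vlist)).filter
        (fun j => PySem.Int.mod j 4 != 3) :=
    List.filter_congr (fun j hj => by
      apply bool_eq_of_iff
      rw [PySem.Int.mod_eq_emod_of_pos (by norm_num : (0:Int) < 4)]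
      simp only [decide_eq_true_eq, bne_iff_ne, ne_eq]
      omega)
  rw [q1, q2, q3, q4, q5, q6]
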